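-- pv_equiv track=rewrite | github.com/LeeSinCOOC/Data-Structure | chapter4/R-4.8.py | isabel
-- ===== SOURCE A (Python) =====
-- def isabel(A,B):
--     n = len(A)//2
--     for i in range(n):
--         B.append(A[2*i] + A[2*i + 1])
--     if len(A) % 2 == 1:
--         B.append(A[-1])
--     if len(B) == 1:
--         return B[0]
--     else:
--         C = []
--         return isabel(B,C)
-- ===== SOURCE B (Python) =====
-- def isabel(A, B):
--     # one explicit round of pairwise sums appended into the caller's B,
--     # then an iterative while-loop instead of recursion
--     for x, y in zip(A[::2], A[1::2]):
--         B.append(x + y)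
--     if len(A) % 2 == 1:
--         B.append(A[-1])
--     cur = B
--     while len(cur) != 1:
--         nxt = [x + y for x, y in zip(cur[::2], cur[1::2])]
--         if len(cur) % 2 == 1:
--             nxt.append(cur[-1])
--         cur = nxt
--     return cur[0]
-- ===== Notes on version B (the rewrite author's own statement) =====
-- stated objective: alternative
-- what changed: Replaces the recursion with an explicit while-loop that repeatedly builds the next level of adjacent-pair sums via zip of even/odd slices instead of index arithmetic over range(len//2); the first round still appends into the caller's B.
import Mathlib
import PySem

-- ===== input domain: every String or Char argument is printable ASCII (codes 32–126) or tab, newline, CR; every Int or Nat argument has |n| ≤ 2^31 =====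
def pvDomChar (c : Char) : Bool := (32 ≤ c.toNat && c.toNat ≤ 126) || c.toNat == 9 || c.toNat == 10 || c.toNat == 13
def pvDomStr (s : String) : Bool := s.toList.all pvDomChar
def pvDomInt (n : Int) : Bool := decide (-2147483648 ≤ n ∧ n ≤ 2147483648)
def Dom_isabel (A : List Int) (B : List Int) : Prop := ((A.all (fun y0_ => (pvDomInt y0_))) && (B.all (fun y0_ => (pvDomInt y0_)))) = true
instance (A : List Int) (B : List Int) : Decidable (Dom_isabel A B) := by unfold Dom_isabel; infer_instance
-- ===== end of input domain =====

-- B mutates the caller's B exactly as A does (the first round of appends); the equivalence proved here is about the RETURN value.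

-- ===== PORT A =====
-- fuel-bounded transliteration of A's recursion; fuel |A|+|B|+2 always suffices under Pre_
def isabelFuel : Nat → List Int → List Int → Int
  | 0, _, _ => 0  -- fuel guard, unreachable under Pre_isabel
  | f+1, A, B =>
    let n : Int := PySem.Int.floordiv (A.length : Int) 2
    let B1 := (PySem.List.pyRange 0 n 1).foldl
        (fun acc i => acc ++ [PySem.List.pyGetD A (2*i) 0 + PySem.List.pyGetD A (2*i+1) 0]) B
    let B2 := if PySem.Int.mod (A.length : Int) 2 == 1
              then B1 ++ [PySem.List.pyGetD A (-1) 0] else B1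
    if B2.length == 1 then PySem.List.pyGetD B2 0 0
    else isabelFuel f B2 []

def isabel (A : List Int) (B : List Int) : Int := isabelFuel (A.length + B.length + 2) A B

-- ===== PORT B =====
-- xs[::2] ported by hand (slice with step 2): every second element starting at index 0 — exact
def everyOther : List Int → List Int
  | [] => []
  | [x] => [x]
  | x :: _ :: t => x :: everyOther t

-- one round of the while-loop body: zip(cur[::2], cur[1::2]) pair sums plus the odd tail
def altRound (cur : List Int) : List Int :=
  let nxt := ((everyOther cur).zip (everyOther (cur.drop 1))).map (fun p => p.1 + p.2)
  if PySem.Int.mod (cur.length : Int) 2 == 1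
  then nxt ++ [PySem.List.pyGetD cur (-1) 0] else nxt

-- fuel-bounded transliteration of the while-loop; fuel |cur|+1 always suffices under Pre_
def altLoop : Nat → List Int → Int
  | 0, cur => PySem.List.pyGetD cur 0 0  -- fuel guard, unreachable under Pre_isabel
  | f+1, cur => if cur.length == 1 then PySem.List.pyGetD cur 0 0
                else altLoop f (altRound cur)

def isabel_alt (A : List Int) (B : List Int) : Int :=
  let B1 := ((everyOther A).zip (everyOther (A.drop 1))).foldl
      (fun acc p => acc ++ [p.1 + p.2]) B
  let B2 := if PySem.Int.mod (A.length : Int) 2 == 1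
            then B1 ++ [PySem.List.pyGetD A (-1) 0] else B1
  altLoop (B2.length + 1) B2

-- ===== PRECONDITION & SPEC =====
-- Pre_ excludes only A = [] = B, where A raises RecursionError (and B's while-loop never returns)
def Pre_isabel (A : List Int) (B : List Int) : Prop := A ≠ [] ∨ B ≠ []
instance (A : List Int) (B : List Int) : Decidable (Pre_isabel A B) := by unfold Pre_isabel; infer_instance
def pvWitness_isabel : List Int × List Int := ([1, 2, 3], [])

def Spec_isabel (A : List Int) (B : List Int) (out : Int) : Prop := out = isabel_alt A B
instance (A : List Int) (B : List Int) (out : Int) : Decidable (Spec_isabel A B out) := by unfold Spec_isabel; infer_instance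

-- ===== CLAIM (what is proved, stated in full; the proofs are below) =====
def Claim_equal_isabel : Prop := ∀ (A : List Int) (B : List Int), Dom_isabel A B → Pre_isabel A B → Spec_isabel A B (isabel A B)

-- ===== LEMMAS AND PROOFS =====

theorem length_everyOther (L : List Int) : (everyOther L).length = (L.length + 1) / 2 := by
  induction L using everyOther.induct with
  | case1 => simp [everyOther]
  | case2 x => simp [everyOther]
  | case3 x y t ih => simp [everyOther, ih]; omega

theorem length_altRound (L : List Int) : (altRound L).length = (L.length + 1) / 2 := by
  unfold altRound
  have h2 : PySem.Int.mod (L.length : Int) 2 = ((L.length % 2 : Nat) : Int) :=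
    PySem.Int.mod_natCast L.length 2
  split <;> rename_i h <;>
    simp_all [List.length_zip, length_everyOther] <;> omega

theorem altRound_ne_nil {L : List Int} (h : L ≠ []) : altRound L ≠ [] := by
  have hlen := length_altRound L
  have hl : 0 < L.length := List.length_pos_iff.mpr h
  intro hc
  rw [hc] at hlen
  simp at hlen
  omega

theorem altRound_lt {L : List Int} (h : 2 ≤ L.length) : (altRound L).length < L.length := by
  rw [length_altRound]; omega

theorem altRound_singleton (a : Int) : altRound [a] = [a] := by
  simp [altRound, everyOther, PySem.Int.mod, PySem.List.pyGetD, PySem.List.pyGet?, PySem.List.pyIdx?]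

-- the common limit of both iterations: repeated adjacent-pair reduction
def red (L : List Int) : Int :=
  if L.length ≤ 1 then PySem.List.pyGetD L 0 0
  else red (altRound L)
termination_by L.length
decreasing_by exact altRound_lt (by omega)

theorem red_step {L : List Int} (h : L ≠ []) : red L = red (altRound L) := by
  by_cases h1 : L.length ≤ 1
  · have hl1 : L.length = 1 := by
      have := List.length_pos_iff.mpr h; omega
    obtain ⟨a, rfl⟩ := List.length_eq_one_iff.mp hl1
    rw [altRound_singleton]
  · rw [red, if_neg h1]

theorem everyOther_cons (x : Int) (t : List Int) :
    everyOther (x :: t) = x :: everyOther t.tail := by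
  cases t <;> simp [everyOther]

theorem pairs_map_range (L : List Int) :
    (List.range (L.length / 2)).map (fun k => L.getD (2*k) 0 + L.getD (2*k+1) 0)
      = ((everyOther L).zip (everyOther (L.drop 1))).map (fun p => p.1 + p.2) := by
  induction L using everyOther.induct with
  | case1 => simp [everyOther]
  | case2 x => simp [everyOther]
  | case3 x y t ih =>
    have hlen : (x :: y :: t).length / 2 = t.length / 2 + 1 := by simp; omega
    have hfun : ∀ k, ((fun k => (x :: y :: t).getD (2*k) 0 + (x :: y :: t).getD (2*k+1) 0) ∘ Nat.succ) k
        = t.getD (2*k) 0 + t.getD (2*k+1) 0 := by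
      intro k
      have e1 : 2 * Nat.succ k = 2*k + 1 + 1 := by omega
      have e2 : 2 * Nat.succ k + 1 = (2*k + 1 + 1) + 1 := by omega
      simp [e1, e2, List.getD]
    rw [hlen, List.range_succ_eq_map, List.map_cons, List.map_map,
        List.map_congr_left (fun k _ => hfun k)]
    simp only [List.drop_one] at ih ⊢
    rw [everyOther_cons x (y :: t)]
    simp only [List.tail_cons]
    rw [everyOther_cons y t]
    simp only [List.zip_cons_cons, List.map_cons]
    simp
    simpa [List.getD] using ih

-- A's first round (range-indexed appends plus odd tail) lands on altRound
theorem roundA (L B : List Int) :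
    (if PySem.Int.mod (L.length : Int) 2 == 1
     then ((PySem.List.pyRange 0 (PySem.Int.floordiv (L.length : Int) 2) 1).foldl
        (fun acc i => acc ++ [PySem.List.pyGetD L (2*i) 0 + PySem.List.pyGetD L (2*i+1) 0]) B)
        ++ [PySem.List.pyGetD L (-1) 0]
     else ((PySem.List.pyRange 0 (PySem.Int.floordiv (L.length : Int) 2) 1).foldl
        (fun acc i => acc ++ [PySem.List.pyGetD L (2*i) 0 + PySem.List.pyGetD L (2*i+1) 0]) B))
    = B ++ altRound L := by
  have hdiv : PySem.Int.floordiv (L.length : Int) 2 = ((L.length / 2 : Nat) : Int) :=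
    PySem.Int.floordiv_natCast L.length 2
  have hrange := PySem.List.pyRange_zero_natCast (L.length / 2)
  have key : ((List.range (L.length / 2)).map (fun (k : Nat) => (k : Int))).foldl
        (fun acc i => acc ++ [PySem.List.pyGetD L (2*i) 0 + PySem.List.pyGetD L (2*i+1) 0]) B
      = B ++ ((everyOther L).zip (everyOther (L.drop 1))).map (fun p => p.1 + p.2) := by
    rw [PySem.List.foldl_append_singleton_eq_map, List.map_map, ← pairs_map_range]
    congr 1
    refine List.map_congr_left ?_
    intro k _
    have e1 : (2 : Int) * (k : Int) = ((2*k : Nat) : Int) := by push_cast; ring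
    have e2 : (2 : Int) * (k : Int) + 1 = ((2*k+1 : Nat) : Int) := by push_cast; ring
    simp only [Function.comp_apply]
    rw [e2, e1, PySem.List.pyGetD_natCast, PySem.List.pyGetD_natCast]
  rw [hdiv, hrange, key]
  unfold altRound
  by_cases h : PySem.Int.mod (L.length : Int) 2 == 1
  · rw [if_pos h, if_pos h, List.append_assoc]
  · rw [if_neg h, if_neg h]

theorem isabelFuel_succ (f : Nat) (L M : List Int) :
    isabelFuel (f+1) L M = if ((M ++ altRound L).length == 1)
      then PySem.List.pyGetD (M ++ altRound L) 0 0
      else isabelFuel f (M ++ altRound L) [] := by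
  simp only [isabelFuel]
  rw [roundA]

theorem fuelA : ∀ (f : Nat) (L : List Int), L ≠ [] → L.length ≤ f →
    isabelFuel f L [] = red L := by
  intro f
  induction f with
  | zero => intro L h hf; exact absurd (List.length_eq_zero_iff.mp (by omega)) h
  | succ f ih =>
    intro L h hf
    rw [isabelFuel_succ, List.nil_append]
    by_cases h1 : (altRound L).length = 1
    · simp only [h1, beq_self_eq_true, if_true]
      rw [red_step h, red, if_pos (by omega : (altRound L).length ≤ 1)]
    · have hne : altRound L ≠ [] := altRound_ne_nil h
      have hLge : 2 ≤ L.length := by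
        by_contra hcon
        have hl1 : L.length = 1 := by
          have := List.length_pos_iff.mpr h; omega
        obtain ⟨a, rfl⟩ := List.length_eq_one_iff.mp hl1
        rw [altRound_singleton] at h1
        exact h1 rfl
      have hlt : (altRound L).length < L.length := altRound_lt hLge
      have hb : ((altRound L).length == 1) = false := by simp [h1]
      rw [hb]
      simp only [Bool.false_eq_true, if_false]
      rw [ih (altRound L) hne (by omega), red_step h]

theorem loopB : ∀ (f : Nat) (L : List Int), L ≠ [] → L.length ≤ f →
    altLoop f L = red L := by
  intro f
  induction f with
  | zero => intro L h hf; exact absurd (List.length_eq_zero_iff.mp (by omega)) h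
  | succ f ih =>
    intro L h hf
    rw [altLoop]
    by_cases h1 : L.length = 1
    · simp only [h1, beq_self_eq_true, if_true]
      rw [red, if_pos (by omega : L.length ≤ 1)]
    · have hge : 2 ≤ L.length := by
        have := List.length_pos_iff.mpr h; omega
      have hb : (L.length == 1) = false := by simp [h1]
      rw [hb]
      simp only [Bool.false_eq_true, if_false]
      rw [ih (altRound L) (altRound_ne_nil h) (by have := altRound_lt hge; omega)]
      exact (red_step h).symm

theorem isabel_alt_eq_altLoop (A B : List Int) :
    isabel_alt A B = altLoop ((B ++ altRound A).length + 1) (B ++ altRound A) := by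
  simp only [isabel_alt, PySem.List.foldl_append_singleton_eq_map]
  unfold altRound
  by_cases h : PySem.Int.mod (A.length : Int) 2 == 1
  · rw [if_pos h, if_pos h, List.append_assoc]
  · rw [if_neg h, if_neg h]

-- ===== VERDICT (by name: the statement is the Claim_ definition above) =====
theorem isabel_spec : Claim_equal_isabel := by
  unfold Claim_equal_isabel
  intro A B _ hpre
  unfold Spec_isabel
  have hB2 : B ++ altRound A ≠ [] := by
    intro hc
    rcases List.append_eq_nil_iff.mp hc with ⟨h1, h2⟩
    rcases hpre with h | h
    · exact altRound_ne_nil h h2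
    · exact h h1
  have hlen : (B ++ altRound A).length = B.length + (A.length + 1) / 2 := by
    simp [length_altRound]
  have hA : isabel A B = red (B ++ altRound A) := by
    unfold isabel
    have hsum : A.length + B.length + 2 = (A.length + B.length + 1) + 1 := by omega
    rw [hsum, isabelFuel_succ]
    by_cases h1 : (B ++ altRound A).length = 1
    · simp only [h1, beq_self_eq_true, if_true]
      rw [red, if_pos (by omega : (B ++ altRound A).length ≤ 1)]
    · have hb : ((B ++ altRound A).length == 1) = false := by
        simp at h1 ⊢; omega
      rw [hb]
      simp only [Bool.false_eq_true, if_false]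
      exact fuelA _ _ hB2 (by omega)
  have hB : isabel_alt A B = red (B ++ altRound A) := by
    rw [isabel_alt_eq_altLoop]
    exact loopB _ _ hB2 (by omega)
  rw [hA, hB]
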